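-- pv_equiv track=rewrite | github.com/Fondamenti18/fondamenti-di-programmazione | students/1816309/homework02/program03.py | uguali
-- ===== SOURCE A (Python) =====
-- def uguali(parola,codice):
-- 	try:
-- 		m = max([len(parola),len(codice)])
-- 		for indice in range(m):
-- 			if trovaProssimo(parola,indice) != trovaProssimo(codice,indice):
-- 				return False
-- 		return True
-- 	except Exception as eccezione:
-- 		return False
--
-- def trovaProssimo(stringa,indice):
-- 	return stringa.find(stringa[indice],indice+1)
-- ===== SOURCE B (Python) =====
-- def uguali(parola, codice):
--     if len(parola) != len(codice):
--         return False
--     return _prossimi(parola) == _prossimi(codice)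
--
-- def _prossimi(s):
--     # next-occurrence index of s[i] after i, computed in one right-to-left pass
--     last = {}
--     res = [0] * len(s)
--     for i in range(len(s) - 1, -1, -1):
--         res[i] = last.get(s[i], -1)
--         last[s[i]] = i
--     return res
-- ===== Notes on version B (the rewrite author's own statement) =====
-- stated objective: alternative
-- what changed: Instead of calling str.find per index (a fresh forward scan each iteration) over max(len) indices with an exception-driven length check, B rejects unequal lengths up front and builds each string's next-occurrence array in a single right-to-left pass with a last-seen dict, then compares the two arrays.
import Mathlib
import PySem

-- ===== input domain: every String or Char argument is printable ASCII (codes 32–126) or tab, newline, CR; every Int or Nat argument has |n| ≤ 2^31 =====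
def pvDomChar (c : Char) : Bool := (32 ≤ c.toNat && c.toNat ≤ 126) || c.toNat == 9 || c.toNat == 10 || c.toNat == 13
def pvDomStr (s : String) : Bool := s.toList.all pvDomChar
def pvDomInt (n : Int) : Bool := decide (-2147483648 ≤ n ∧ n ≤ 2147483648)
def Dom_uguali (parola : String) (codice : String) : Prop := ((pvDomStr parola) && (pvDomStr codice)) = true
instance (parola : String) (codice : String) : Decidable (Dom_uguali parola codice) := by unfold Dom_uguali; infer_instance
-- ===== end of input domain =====

-- B replaces A's per-index str.find scans by a single right-to-left pass building both
-- next-occurrence arrays with a last-seen dict, then compares the arrays (objective: alternative).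

-- ===== PORT A =====
-- stringa.find(stringa[indice], indice+1): the 1-char substring find is exact via
-- Chars.findFrom on .toList (Str.findFrom_eq); none = IndexError from stringa[indice],
-- caught by A's try/except which then returns False
def trovaProssimo (stringa : String) (indice : Int) : Option Int :=
  (PySem.Str.pyGet? stringa indice).map
    (fun ch => PySem.Chars.findFrom stringa.toList [ch] (indice + 1) none)

-- the 'for indice in range(m)' loop; any none (IndexError) makes the whole try return False
def ugualiLoop (parola : String) (codice : String) : List Int → Bool
  | [] => true
  | indice :: rest =>
    match trovaProssimo parola indice, trovaProssimo codice indice with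
    | some a, some b => if a ≠ b then false else ugualiLoop parola codice rest
    | _, _ => false

def uguali (parola : String) (codice : String) : Bool :=
  -- m = max([len(parola), len(codice)])  (max of a two-element list, never raises)
  let m : Int := max (parola.toList.length : Int) (codice.toList.length : Int)
  ugualiLoop parola codice (PySem.List.pyRange 0 m 1)

-- ===== PORT B =====
-- the right-to-left pass of _prossimi: returns (last-seen dict, next-occurrence list),
-- positions counted from i for the processed suffix
def prossimiLoop : List Char → Int → PySem.Dict Char Int × List Int
  | [], _ => (PySem.Dict.empty, [])
  | ch :: rest, i =>
    let (d, ns) := prossimiLoop rest (i + 1)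
    (d.insert ch i, d.getD ch (-1) :: ns)

def uguali_alt (parola : String) (codice : String) : Bool :=
  if parola.toList.length ≠ codice.toList.length then false
  else decide ((prossimiLoop parola.toList 0).2 = (prossimiLoop codice.toList 0).2)

-- ===== PRECONDITION & SPEC =====
def Spec_uguali (parola : String) (codice : String) (out : Bool) : Prop := out = uguali_alt parola codice
instance (parola : String) (codice : String) (out : Bool) : Decidable (Spec_uguali parola codice out) := by unfold Spec_uguali; infer_instance

-- ===== CLAIM (what is proved, stated in full; the proofs are below) =====
def Claim_equal_uguali : Prop := ∀ (parola : String) (codice : String), Dom_uguali parola codice → Spec_uguali parola codice (uguali parola codice)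

-- ===== LEMMAS AND PROOFS =====

-- first-occurrence index of c in l, offset by i (the value B's dict stores / A's find returns)
def nxVal (l : List Char) (c : Char) (i : Int) : Int :=
  match l.findIdx? (fun x => x == c) with
  | some j => i + j
  | none => -1

-- spec list for prossimiLoop's second component
def nxList : List Char → Int → List Int
  | [], _ => []
  | ch :: rest, i => nxVal rest ch (i + 1) :: nxList rest (i + 1)

theorem prossimiLoop_fst (l : List Char) (i : Int) (c : Char) :
    ((prossimiLoop l i).1).getD c (-1) = nxVal l c i := by
  induction l generalizing i with
  | nil => simp [prossimiLoop, nxVal, PySem.Dict.empty, PySem.Dict.getD, PySem.Dict.get?]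
  | cons ch rest ih =>
    simp only [prossimiLoop]
    rw [PySem.Dict.getD_insert]
    by_cases h : c = ch
    · subst h; simp [nxVal, List.findIdx?_cons]
    · simp [h, ih, nxVal, List.findIdx?_cons, beq_false_of_ne (Ne.symm h)]
      cases hf : rest.findIdx? (fun x => x == c) <;> simp <;> ring

theorem prossimiLoop_snd (l : List Char) (i : Int) :
    (prossimiLoop l i).2 = nxList l i := by
  induction l generalizing i with
  | nil => rfl
  | cons ch rest ih => simp [prossimiLoop, nxList, ih, prossimiLoop_fst]

theorem nxList_length (l : List Char) (i : Int) : (nxList l i).length = l.length := by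
  induction l generalizing i with
  | nil => rfl
  | cons ch rest ih => simp [nxList, ih]

theorem nxList_getElem? (l : List Char) (i : Int) (k : Nat) (h : k < l.length) :
    (nxList l i)[k]? = some (nxVal (l.drop (k + 1)) l[k] (i + k + 1)) := by
  induction l generalizing i k with
  | nil => simp at h
  | cons ch rest ih =>
    cases k with
    | zero => simp [nxList]
    | succ k =>
      simp only [nxList, List.getElem?_cons_succ, List.getElem_cons_succ, List.drop_succ_cons]
      rw [ih (i+1) k (by simpa using h)]
      congr 2
      push_cast; ring

theorem singleton_prefix_iff (c : Char) (l : List Char) : [c] <+: l ↔ l[0]? = some c := by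
  cases l with
  | nil => simp
  | cons a t => simp [List.cons_prefix_cons]; exact eq_comm

theorem singleton_prefix_drop_iff (c : Char) (l : List Char) (j : Nat) :
    [c] <+: l.drop j ↔ l[j]? = some c := by
  rw [singleton_prefix_iff, List.getElem?_drop]; simp

theorem find_singleton (l : List Char) (c : Char) :
    PySem.Chars.find l [c] =
      (match l.findIdx? (fun x => x == c) with
       | some j => (j : Int)
       | none => -1) := by
  cases hf : l.findIdx? (fun x => x == c) with
  | none =>
    rw [List.findIdx?_eq_none_iff] at hf
    simp only []
    rw [PySem.Chars.find_eq_neg_one_iff]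
    intro hinf
    have hc : c ∈ l := hinf.subset (List.mem_singleton_self c)
    have := hf c hc
    simp at this
  | some j =>
    rw [List.findIdx?_eq_some_iff_getElem] at hf
    obtain ⟨hlt, hpj, hmin⟩ := hf
    have hpre : [c] <+: l.drop j := by
      rw [singleton_prefix_drop_iff]
      simp only [beq_iff_eq] at hpj
      simp [List.getElem?_eq_getElem hlt, hpj]
    have hinf : [c] <:+: l := hpre.isInfix.trans (List.drop_suffix j l).isInfix
    have hnn : 0 ≤ PySem.Chars.find l [c] := (PySem.Chars.find_nonneg_iff l [c]).mpr hinf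
    obtain ⟨hat, hminf⟩ := PySem.Chars.find_spec hnn
    have h1 : j ≤ (PySem.Chars.find l [c]).toNat := by
      by_contra hc2
      push_neg at hc2
      have := hmin _ hc2
      rw [singleton_prefix_drop_iff] at hat
      have hlt2 : (PySem.Chars.find l [c]).toNat < l.length := by
        by_contra h3
        push_neg at h3
        rw [List.getElem?_eq_none h3] at hat
        simp at hat
      rw [List.getElem?_eq_getElem hlt2] at hat
      simp_all
    have h2 : (PySem.Chars.find l [c]).toNat ≤ j := by
      by_contra hc2
      push_neg at hc2
      exact hminf j hc2 hpre
    have : (PySem.Chars.find l [c]).toNat = j := le_antisymm h2 h1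
    simp only []
    omega

theorem trovaProssimo_eq (s : String) (k : Nat) (h : k < s.toList.length) :
    trovaProssimo s (k : Int) =
      some (nxVal (s.toList.drop (k + 1)) s.toList[k] ((k : Int) + 1)) := by
  unfold trovaProssimo
  rw [PySem.Str.pyGet?_natCast, List.getElem?_eq_getElem h]
  simp only [Option.map_some]
  congr 1
  have hcast : (k : Int) + 1 = ((k + 1 : Nat) : Int) := by push_cast; ring
  rw [hcast, PySem.Chars.findFrom_natCast s.toList [s.toList[k]] (k+1) (by omega)]
  rw [find_singleton]
  cases hf : (s.toList.drop (k+1)).findIdx? (fun x => x == s.toList[k]) with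
  | none => simp [nxVal, hf]
  | some j => simp [nxVal, hf]

theorem ugualiLoop_eq_true_iff (p c : String) (is : List Int) :
    ugualiLoop p c is = true ↔
      ∀ i ∈ is, ∃ a, trovaProssimo p i = some a ∧ trovaProssimo c i = some a := by
  induction is with
  | nil => simp [ugualiLoop]
  | cons i rest ih =>
    simp only [ugualiLoop]
    cases hp : trovaProssimo p i with
    | none => simp [hp]
    | some a =>
      cases hc : trovaProssimo c i with
      | none => simp [hp, hc]
      | some b =>
        by_cases hab : a = b
        · subst hab; simp [hp, hc, ih]
        · simp [hp, hc, hab]; exact fun h' => absurd (h'.symm) hab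

theorem trovaProssimo_none (s : String) (k : Nat) (h : s.toList.length ≤ k) :
    trovaProssimo s (k : Int) = none := by
  unfold trovaProssimo
  rw [PySem.Str.pyGet?_natCast, List.getElem?_eq_none h]
  rfl

theorem uguali_eq_alt (parola codice : String) : uguali parola codice = uguali_alt parola codice := by
  unfold uguali uguali_alt
  by_cases hlen : parola.toList.length = codice.toList.length
  · simp only [hlen, ne_eq, not_true_eq_false, if_false, max_self]
    rw [Bool.eq_iff_iff, ugualiLoop_eq_true_iff, decide_eq_true_iff]
    rw [prossimiLoop_snd, prossimiLoop_snd]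
    constructor
    · intro hall
      apply List.ext_getElem?
      intro k
      by_cases hk : k < codice.toList.length
      · rw [nxList_getElem? _ _ k (by omega), nxList_getElem? _ _ k hk]
        have hmem : (k : Int) ∈ PySem.List.pyRange 0 (codice.toList.length : Int) 1 := by
          rw [PySem.List.mem_pyRange_one]; omega
        obtain ⟨a, hpa, hca⟩ := hall _ hmem
        rw [trovaProssimo_eq _ k (by omega)] at hpa
        rw [trovaProssimo_eq _ k hk] at hca
        have : nxVal (parola.toList.drop (k+1)) parola.toList[k] ((k:Int)+1)
             = nxVal (codice.toList.drop (k+1)) codice.toList[k] ((k:Int)+1) :=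
          Option.some_inj.mp (hpa.trans hca.symm)
        have harith : (0 : Int) + k + 1 = (k : Int) + 1 := by ring
        rw [harith, this]
      · rw [List.getElem?_eq_none (by rw [nxList_length]; omega),
            List.getElem?_eq_none (by rw [nxList_length]; omega)]
    · intro heq i hi
      rw [PySem.List.mem_pyRange_one] at hi
      obtain ⟨h0, hlt⟩ := hi
      obtain ⟨k, rfl⟩ := Int.eq_ofNat_of_zero_le h0
      have hk : k < codice.toList.length := by exact_mod_cast hlt
      have hk2 : k < parola.toList.length := by omega
      refine ⟨nxVal (parola.toList.drop (k+1)) (parola.toList[k]'hk2) ((k:Int)+1),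
        trovaProssimo_eq _ k hk2, ?_⟩
      rw [trovaProssimo_eq _ k hk]
      have h1 := nxList_getElem? parola.toList 0 k (by omega)
      have h2 := nxList_getElem? codice.toList 0 k hk
      rw [heq, h2] at h1
      have harith : (0 : Int) + k + 1 = (k : Int) + 1 := by ring
      rw [harith] at h1
      exact h1
  · have hne : parola.toList.length ≠ codice.toList.length := hlen
    rw [if_pos hne, Bool.eq_false_iff, ne_eq]
    intro htrue
    rw [ugualiLoop_eq_true_iff] at htrue
    have hall := htrue
    rcases Nat.lt_or_ge parola.toList.length codice.toList.length with hlt | hge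
    · have hmem : ((parola.toList.length : Nat) : Int) ∈
          PySem.List.pyRange 0 (max (parola.toList.length : Int) (codice.toList.length : Int)) 1 := by
        rw [PySem.List.mem_pyRange_one]
        constructor
        · omega
        · have : (parola.toList.length : Int) < (codice.toList.length : Int) := by exact_mod_cast hlt
          omega
      obtain ⟨a, hpa, _⟩ := hall _ hmem
      rw [trovaProssimo_none _ _ (le_refl _)] at hpa
      simp at hpa
    · have hlt2 : codice.toList.length < parola.toList.length := by omega
      have hmem : ((codice.toList.length : Nat) : Int) ∈
          PySem.List.pyRange 0 (max (parola.toList.length : Int) (codice.toList.length : Int)) 1 := by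
        rw [PySem.List.mem_pyRange_one]
        constructor
        · omega
        · have : (codice.toList.length : Int) < (parola.toList.length : Int) := by exact_mod_cast hlt2
          omega
      obtain ⟨a, _, hca⟩ := hall _ hmem
      rw [trovaProssimo_none _ _ (le_refl _)] at hca
      simp at hca

-- ===== VERDICT (by name: the statement is the Claim_ definition above) =====
theorem uguali_spec : Claim_equal_uguali := by
  intro parola codice _
  unfold Spec_uguali
  exact uguali_eq_alt parola codice
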